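-- pv_equiv track=rewrite | github.com/rishit51/DSA | hashing/google_oa_special_pair.py | special_pairs
-- ===== SOURCE A (Python) =====
-- def special_pairs(nums:list):
--
--     nums=[0]+nums
--
--     mp={}
--     pairs=0
--     for i in nums:
--         if 1<=i<=len(nums):
--             first_jump=nums[i]
--             if 1<=first_jump<len(nums):
--                 second_jump=nums[first_jump]
--                 if second_jump in mp:
--                     pairs+=mp[second_jump]
--                 mp[second_jump]=mp.get(second_jump,0)+1
--
--     return pairs
-- ===== SOURCE B (Python) =====
-- def special_pairs(nums: list):
--     nums = [0] + nums
--     n = len(nums)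
--     # phase 1: collect every valid second_jump value
--     seconds = []
--     for i in nums:
--         if 1 <= i <= n:
--             first_jump = nums[i]
--             if 1 <= first_jump < n:
--                 seconds.append(nums[first_jump])
--     # phase 2: per-group closed-form combinations
--     counts = {}
--     for v in seconds:
--         counts[v] = counts.get(v, 0) + 1
--     return sum(c * (c - 1) // 2 for c in counts.values())
-- ===== Notes on version B (the rewrite author's own statement) =====
-- stated objective: alternative
-- what changed: Replaces the interleaved running-accumulator counting (add prior multiplicity before each increment) by a two-phase decomposition: first collect all valid second_jump values into a list, then sum the closed-form c*(c-1)//2 over its frequency table.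
import Mathlib
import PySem

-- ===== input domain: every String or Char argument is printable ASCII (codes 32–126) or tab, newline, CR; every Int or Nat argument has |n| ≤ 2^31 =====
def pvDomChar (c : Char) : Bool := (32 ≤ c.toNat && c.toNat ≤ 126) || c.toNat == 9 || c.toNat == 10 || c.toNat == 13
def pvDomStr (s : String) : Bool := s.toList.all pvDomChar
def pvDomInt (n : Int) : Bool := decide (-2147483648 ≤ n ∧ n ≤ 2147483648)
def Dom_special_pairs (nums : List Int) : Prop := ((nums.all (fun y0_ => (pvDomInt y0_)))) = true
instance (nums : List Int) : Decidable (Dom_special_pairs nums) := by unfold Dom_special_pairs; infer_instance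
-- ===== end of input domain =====

-- B changes the decomposition: collect all second_jump values first, then sum c*(c-1)//2
-- per frequency-table group, instead of A's running accumulator interleaved with the dict update.

-- ===== PORT A =====
-- literal port of A: one pass, dict of multiplicities, pairs accumulator updated in the loop.
-- where the Python raises IndexError (nums[i] with i = len(nums)) the match's none branch
-- leaves the state unchanged; those inputs are excluded by Pre_special_pairs.
def special_pairs (nums : List Int) : Int :=
  let nums1 := 0 :: nums
  let res := nums1.foldl (fun (st : PySem.Dict Int Int × Int) i =>
    if 1 ≤ i ∧ i ≤ (nums1.length : Int) then
      match PySem.List.pyGet? nums1 i with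
      | none => st
      | some first_jump =>
        if 1 ≤ first_jump ∧ first_jump < (nums1.length : Int) then
          match PySem.List.pyGet? nums1 first_jump with
          | none => st
          | some second_jump =>
            let pairs := if (st.1.get? second_jump).isSome
                         then st.2 + st.1.getD second_jump 0 else st.2
            (st.1.insert second_jump (st.1.getD second_jump 0 + 1), pairs)
        else st
    else st) (PySem.Dict.empty, 0)
  res.2

-- ===== PORT B =====
-- literal port of B: phase 1 collects the seconds list, phase 2 counts and sums C(c,2).
def special_pairs_alt (nums : List Int) : Int :=
  let nums1 := 0 :: nums
  let seconds := nums1.foldl (fun (acc : List Int) i =>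
    if 1 ≤ i ∧ i ≤ (nums1.length : Int) then
      match PySem.List.pyGet? nums1 i with
      | none => acc
      | some first_jump =>
        if 1 ≤ first_jump ∧ first_jump < (nums1.length : Int) then
          match PySem.List.pyGet? nums1 first_jump with
          | none => acc
          | some second_jump => acc ++ [second_jump]
        else acc
    else acc) []
  let counts := seconds.foldl (fun (d : PySem.Dict Int Int) v => d.insert v (d.getD v 0 + 1))
    PySem.Dict.empty
  (counts.values.map (fun c => PySem.Int.floordiv (c * (c - 1)) 2)).sum

-- ===== PRECONDITION & SPEC =====
-- Pre_ excludes exactly the inputs where A (and B) raise IndexError: some element equals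
-- nums.length + 1, the length of the prefixed list (the guard '1 <= i <= len' admits i = len).
def Pre_special_pairs (nums : List Int) : Prop := ((nums.length : Int) + 1) ∉ nums
instance (nums : List Int) : Decidable (Pre_special_pairs nums) := by
  unfold Pre_special_pairs; infer_instance
def pvWitness_special_pairs : List Int := [2, 1, 1, 3]
def Spec_special_pairs (nums : List Int) (out : Int) : Prop := out = special_pairs_alt nums
instance (nums : List Int) (out : Int) : Decidable (Spec_special_pairs nums out) := by
  unfold Spec_special_pairs; infer_instance

-- ===== CLAIM (what is proved, stated in full; the proofs are below) =====
def Claim_equal_special_pairs : Prop := ∀ (nums : List Int), Dom_special_pairs nums → Pre_special_pairs nums → Spec_special_pairs nums (special_pairs nums)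

-- ===== LEMMAS AND PROOFS =====

-- the value extracted by both programs' guard chain for a loop element i
def secOf (l : List Int) (i : Int) : Option Int :=
  if 1 ≤ i ∧ i ≤ (l.length : Int) then
    match PySem.List.pyGet? l i with
    | none => none
    | some fj =>
      if 1 ≤ fj ∧ fj < (l.length : Int) then PySem.List.pyGet? l fj else none
  else none

-- a fold whose step fires only on 'some g i' is a fold over the filterMap
theorem foldl_filterMap_opt {σ : Type} (g : Int → Option Int) (h : σ → Int → σ)
    (step : σ → Int → σ)
    (hstep : ∀ st i, step st i = match g i with | none => st | some v => h st v) :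
    ∀ (l : List Int) (st : σ), l.foldl step st = (l.filterMap g).foldl h st := by
  intro l
  induction l with
  | nil => intro st; simp
  | cons x xs ih =>
    intro st
    simp only [List.foldl_cons, List.filterMap_cons, hstep]
    cases g x <;> simp [ih]

def pairStep (st : PySem.Dict Int Int × Int) (v : Int) : PySem.Dict Int Int × Int :=
  (st.1.insert v (st.1.getD v 0 + 1), st.2 + st.1.getD v 0)

theorem pairStep_eq_literal (st : PySem.Dict Int Int × Int) (v : Int) :
    (st.1.insert v (st.1.getD v 0 + 1),
      if (st.1.get? v).isSome then st.2 + st.1.getD v 0 else st.2) = pairStep st v := by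
  unfold pairStep
  cases hg : st.1.get? v with
  | none => simp [PySem.Dict.getD_eq_get?_getD, hg]
  | some w => simp

theorem pairFold_fst (S : List Int) :
    ∀ (d : PySem.Dict Int Int) (p : Int),
      (S.foldl pairStep (d, p)).1 =
        S.foldl (fun d v => d.insert v (d.getD v 0 + 1)) d := by
  induction S with
  | nil => intro d p; simp
  | cons x xs ih => intro d p; simp [pairStep, ih]

theorem C2_succ (c : Int) :
    PySem.Int.floordiv ((c + 1) * c) 2 = PySem.Int.floordiv (c * (c - 1)) 2 + c := by
  rw [PySem.Int.floordiv_eq_ediv_of_pos (by omega), PySem.Int.floordiv_eq_ediv_of_pos (by omega)]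
  have h : (c + 1) * c = c * (c - 1) + c * 2 := by ring
  rw [h, Int.add_mul_ediv_right _ _ (by omega : (2:Int) ≠ 0)]

theorem sum_map_update (f g : Int → Int) (x : Int) :
    ∀ (ks : List Int), ks.Nodup → x ∈ ks → (∀ k ∈ ks, k ≠ x → f k = g k) →
      (ks.map g).sum = (ks.map f).sum + (g x - f x) := by
  intro ks
  induction ks with
  | nil => intro _ hx; cases hx
  | cons a as ih =>
    intro hnd hx hfg
    rcases List.mem_cons.mp hx with rfl | hx'
    · have : ∀ k ∈ as, g k = f k := by
        intro k hk
        exact (hfg k (List.mem_cons_of_mem _ hk)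
          (fun hkx => (List.nodup_cons.mp hnd).1 (hkx ▸ hk))).symm
      simp only [List.map_cons, List.sum_cons]
      rw [List.map_congr_left this]
      ring
    · have ha : f a = g a := hfg a (List.mem_cons_self) (fun hax => (List.nodup_cons.mp hnd).1 (hax ▸ hx'))
      simp only [List.map_cons, List.sum_cons]
      rw [ih (List.nodup_cons.mp hnd).2 hx' (fun k hk hkx => hfg k (List.mem_cons_of_mem _ hk) hkx), ha]
      ring

-- the heart: the running accumulator over S equals the per-group closed form
theorem pairs_eq_comb (S : List Int) :
    (S.foldl pairStep (PySem.Dict.empty, 0)).2 =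
      ((PySem.Set.ofList S).map (fun k =>
        PySem.Int.floordiv ((S.count k : Int) * ((S.count k : Int) - 1)) 2)).sum := by
  induction S using List.reverseRecOn with
  | nil => simp [PySem.Set.ofList_nil]
  | append_singleton S x ih =>
    have hfst := pairFold_fst S PySem.Dict.empty 0
    have hgetD : (S.foldl pairStep (PySem.Dict.empty, 0)).1.getD x 0 = (S.count x : Int) := by
      rw [hfst, PySem.Dict.getD_foldl_insert_add_one]
      simp
    rw [List.foldl_append]
    simp only [List.foldl_cons, List.foldl_nil]
    have hsnd : (pairStep (S.foldl pairStep (PySem.Dict.empty, 0)) x).2 =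
        (S.foldl pairStep (PySem.Dict.empty, 0)).2 + (S.count x : Int) := by
      simp [pairStep, hgetD]
    rw [hsnd, ih, PySem.Set.ofList_append_singleton]
    by_cases hx : x ∈ S
    · rw [PySem.Set.add_of_mem ((PySem.Set.mem_ofList _ _).mpr hx)]
      rw [sum_map_update
            (fun k => PySem.Int.floordiv ((S.count k : Int) * ((S.count k : Int) - 1)) 2)
            (fun k => PySem.Int.floordiv (((S ++ [x]).count k : Int) * (((S ++ [x]).count k : Int) - 1)) 2)
            x (PySem.Set.ofList S) (PySem.Set.nodup_ofList _) ((PySem.Set.mem_ofList _ _).mpr hx)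
            (by
              intro k _ hkx
              dsimp only
              simp [List.count_append, Ne.symm hkx])]
      have hcx : (S ++ [x]).count x = S.count x + 1 := by
        simp [List.count_append]
      simp only [hcx]
      push_cast
      rw [show ((S.count x : Int) + 1) - 1 = (S.count x : Int) by ring, C2_succ]
      ring
    · rw [PySem.Set.add_of_not_mem (fun h => hx ((PySem.Set.mem_ofList _ _).mp h))]
      have hcx : (S ++ [x]).count x = 1 := by
        simp [List.count_append, List.count_eq_zero_of_not_mem hx]
      have hc0 : S.count x = 0 := List.count_eq_zero_of_not_mem hx
      simp only [List.map_append, List.map_cons, List.map_nil, List.sum_append, List.sum_cons,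
        List.sum_nil, hcx, hc0]
      have hmap : List.map (fun k => PySem.Int.floordiv ((((S ++ [x]).count k : Int)) * (((S ++ [x]).count k : Int) - 1)) 2) (PySem.Set.ofList S)
          = List.map (fun k => PySem.Int.floordiv (((S.count k : Int)) * (((S.count k : Int)) - 1)) 2) (PySem.Set.ofList S) := by
        apply List.map_congr_left
        intro k hk
        have hkx : k ≠ x := fun h => hx (h ▸ (PySem.Set.mem_ofList _ _).mp hk)
        have hc : (S ++ [x]).count k = S.count k := by
          simp [List.count_append, Ne.symm hkx]
        rw [hc]
      rw [hmap]
      push_cast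
      norm_num [PySem.Int.floordiv, Int.fdiv]

-- ===== VERDICT (by name: the statement is the Claim_ definition above) =====
theorem special_pairs_spec : Claim_equal_special_pairs := by
  intro nums _ _
  unfold Spec_special_pairs special_pairs special_pairs_alt
  simp only []
  rw [foldl_filterMap_opt (secOf (0 :: nums))
        (fun acc v => acc ++ [v]) _
        (by
          intro st i
          dsimp only
          unfold secOf
          by_cases h1 : 1 ≤ i ∧ i ≤ ((0 :: nums).length : Int)
          · rw [if_pos h1]; rw [if_pos h1]
            cases hg : PySem.List.pyGet? (0 :: nums) i with
            | none => rfl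
            | some fj =>
              dsimp only
              by_cases h2 : 1 ≤ fj ∧ fj < ((0 :: nums).length : Int)
              · rw [if_pos h2]; rw [if_pos h2]
              · rw [if_neg h2]; rw [if_neg h2]
          · rw [if_neg h1]; rw [if_neg h1])]
  rw [foldl_filterMap_opt (secOf (0 :: nums)) pairStep _
        (by
          intro st i
          unfold secOf
          by_cases h1 : 1 ≤ i ∧ i ≤ ((0 :: nums).length : Int)
          · rw [if_pos h1]; rw [if_pos h1]
            cases hg : PySem.List.pyGet? (0 :: nums) i with
            | none => rfl
            | some fj =>
              dsimp only
              by_cases h2 : 1 ≤ fj ∧ fj < ((0 :: nums).length : Int)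
              · rw [if_pos h2]; rw [if_pos h2]
                cases hg2 : PySem.List.pyGet? (0 :: nums) fj with
                | none => rfl
                | some sj => exact pairStep_eq_literal st sj
              · rw [if_neg h2]; rw [if_neg h2]
          · rw [if_neg h1]; rw [if_neg h1])]
  set S := ((0 :: nums).filterMap (secOf (0 :: nums))) with hS
  rw [pairs_eq_comb S]
  rw [PySem.List.foldl_append_singleton]
  rw [PySem.Dict.foldl_insert_getD_add_one_eq_counter]
  simp [PySem.Dict.values, PySem.Dict.items_counter, List.map_map, Function.comp_def]
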